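-- pv_equiv track=rewrite | github.com/zhangshi0512/Leetcode | HackerRank/1WeekPreparation/Day6_Jesse&Cookies.py | cookies
-- ===== SOURCE A (Python) =====
-- import heapq
--
-- def cookies(k, A):
--     # Convert the list into a min-heap
--     heapq.heapify(A)
--
--     # Initialize a counter for the operations
--     operations = 0
--
--     # While the smallest cookie is less than k and there are at least 2 cookies left
--     while len(A) > 1 and A[0] < k:
--         # Pop the two least sweet cookies
--         least_sweet = heapq.heappop(A)
--         second_least_sweet = heapq.heappop(A)
--
--         # Combine the cookies and push the new cookie into the heap
--         combined_sweetness = least_sweet + 2 * second_least_sweet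
--         heapq.heappush(A, combined_sweetness)
--
--         # Increase the operations counter
--         operations += 1
--
--     # Check if all cookies have sweetness >= k
--     if A[0] < k:
--         return -1
--     else:
--         return operations
-- ===== SOURCE B (Python) =====
-- def cookies(k, A):
--     # Sorted-list strategy: sort once, then pop the two smallest from the front
--     # and re-insert the combined cookie at its ordered position.
--     # (Does not mutate A; the equivalence is about the return value only.)
--     s = sorted(A)
--     operations = 0
--     while len(s) > 1 and s[0] < k:
--         a = s.pop(0)
--         b = s.pop(0)
--         x = a + 2 * b
--         i = 0
--         while i < len(s) and s[i] < x:
--             i += 1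
--         s.insert(i, x)
--         operations += 1
--     if s[0] < k:
--         return -1
--     return operations
-- ===== Notes on version B (the rewrite author's own statement) =====
-- stated objective: alternative
-- what changed: Replaces the binary min-heap with a sorted list: sort once, repeatedly pop the two smallest from the front and re-insert the combined cookie at its ordered position (B also does not mutate A, unlike A's in-place heapify/pops).
import Mathlib
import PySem

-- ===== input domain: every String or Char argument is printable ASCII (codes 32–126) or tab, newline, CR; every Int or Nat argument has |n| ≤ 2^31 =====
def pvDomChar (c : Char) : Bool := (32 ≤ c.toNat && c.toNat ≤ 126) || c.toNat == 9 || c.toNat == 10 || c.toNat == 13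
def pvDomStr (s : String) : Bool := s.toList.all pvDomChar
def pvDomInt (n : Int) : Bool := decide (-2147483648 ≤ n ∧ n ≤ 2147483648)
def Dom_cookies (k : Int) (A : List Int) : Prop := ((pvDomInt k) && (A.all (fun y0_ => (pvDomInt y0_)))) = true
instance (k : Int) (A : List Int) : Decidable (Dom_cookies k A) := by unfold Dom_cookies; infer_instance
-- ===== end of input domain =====

-- B replaces A's binary heap with a sorted list and ordered re-insertion (alternative data
-- structure, similar cost); A mutates its argument in place via heapify/heappop, B does not:
-- the equivalence proved here is about the RETURN value only.

-- ===== PORT A =====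
-- heapq is modelled value-exactly: heappop returns the minimum of the heap's multiset and
-- removes one occurrence of it; A[0] on a heap is its minimum; heappush adds the value.
def heapPop (xs : List Int) : Option (Int × List Int) :=
  match PySem.List.min? xs (fun y => y) with
  | some m => some (m, xs.erase m)
  | none => none

theorem heapPop_length {xs : List Int} {m : Int} {r : List Int}
    (h : heapPop xs = some (m, r)) : r.length + 1 = xs.length := by
  unfold heapPop at h
  cases he : PySem.List.min? xs (fun y => y) with
  | none => simp [he] at h
  | some v =>
    rw [he] at h
    simp only [Option.some.injEq, Prod.mk.injEq] at h
    obtain ⟨hv, hr⟩ := h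
    subst hr
    have hm : v ∈ xs := PySem.List.min?_mem he
    have h1 := List.length_erase_of_mem hm
    have h2 : 0 < xs.length := List.length_pos_of_mem hm
    omega

def cookiesLoop (k : Int) (heap : List Int) (operations : Int) : Int :=
  if 1 < heap.length ∧ (PySem.List.min? heap (fun y => y)).getD 0 < k then
    match hp : heapPop heap with
    | some (least_sweet, h1) =>
      match hp2 : heapPop h1 with
      | some (second_least_sweet, h2) =>
        cookiesLoop k ((least_sweet + 2 * second_least_sweet) :: h2) (operations + 1)
      | none => -1   -- unreachable: the heap has ≥ 2 elements here
    | none => -1     -- unreachable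
  else
    if (PySem.List.min? heap (fun y => y)).getD 0 < k then -1 else operations
termination_by heap.length
decreasing_by
  have l1 := heapPop_length hp
  have l2 := heapPop_length hp2
  simp only [List.length_cons]
  omega

def cookies (k : Int) (A : List Int) : Int :=
  cookiesLoop k A 0

-- ===== PORT B =====
-- the inner `while i < len(s) and s[i] < x … ; s.insert(i, x)` insertion loop of Source B
def insSorted (x : Int) : List Int → List Int
  | [] => [x]
  | b :: t => if b < x then b :: insSorted x t else x :: b :: t

theorem insSorted_perm (x : Int) (l : List Int) : (insSorted x l).Perm (x :: l) := by
  induction l with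
  | nil => simp [insSorted]
  | cons b t ih =>
    simp only [insSorted]
    split
    · exact (ih.cons b).trans (List.Perm.swap x b t)
    · exact List.Perm.refl _

theorem insSorted_length (x : Int) (l : List Int) :
    (insSorted x l).length = l.length + 1 := by
  simpa using (insSorted_perm x l).length_eq

def cookiesAltLoop (k : Int) (s : List Int) (operations : Int) : Int :=
  match s with
  | a :: b :: rest =>
    if a < k then
      cookiesAltLoop k (insSorted (a + 2 * b) rest) (operations + 1)
    else operations                       -- final check: s[0] = a ≥ k
  | [a] => if a < k then -1 else operations
  | [] => 0                               -- unreachable under Pre_ (Source B raises IndexError)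
termination_by s.length
decreasing_by
  simp [insSorted_length]

def cookies_alt (k : Int) (A : List Int) : Int :=
  cookiesAltLoop k (PySem.List.sorted A (fun y => y)) 0

-- ===== PRECONDITION & SPEC =====
-- Pre_ excludes only the empty list, on which A raises IndexError at the final A[0] check.
def Pre_cookies (k : Int) (A : List Int) : Prop := A ≠ []
instance (k : Int) (A : List Int) : Decidable (Pre_cookies k A) := by unfold Pre_cookies; infer_instance
def pvWitness_cookies : Int × List Int := (10, [1, 2, 3, 9, 10, 12])

def Spec_cookies (k : Int) (A : List Int) (out : Int) : Prop := out = cookies_alt k A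
instance (k : Int) (A : List Int) (out : Int) : Decidable (Spec_cookies k A out) := by unfold Spec_cookies; infer_instance

-- ===== CLAIM (what is proved, stated in full; the proofs are below) =====
def Claim_equal_cookies : Prop := ∀ (k : Int) (A : List Int), Dom_cookies k A → Pre_cookies k A → Spec_cookies k A (cookies k A)

-- ===== LEMMAS AND PROOFS =====

theorem insSorted_sorted (x : Int) {l : List Int} (h : l.Pairwise (· ≤ ·)) :
    (insSorted x l).Pairwise (· ≤ ·) := by
  induction l with
  | nil => simp [insSorted]
  | cons b t ih =>
    rw [List.pairwise_cons] at h
    simp only [insSorted]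
    split
    · rename_i hbx
      rw [List.pairwise_cons]
      refine ⟨fun y hy => ?_, ih h.2⟩
      rcases List.mem_cons.1 ((insSorted_perm x t).mem_iff.1 hy) with rfl | hyt
      · omega
      · exact h.1 y hyt
    · rename_i hbx
      rw [List.pairwise_cons]
      refine ⟨fun y hy => ?_, List.pairwise_cons.2 h⟩
      rcases List.mem_cons.1 hy with rfl | hyt
      · omega
      · have := h.1 y hyt; omega

-- the minimum value of a multiset equals the head of any sorted arrangement
theorem min?_of_perm_sorted {heap : List Int} {a : Int} {t : List Int}
    (hp : heap.Perm (a :: t)) (hs : (a :: t).Pairwise (· ≤ ·)) :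
    PySem.List.min? heap (fun y => y) = some a := by
  cases hm : PySem.List.min? heap (fun y => y) with
  | none =>
    have : heap = [] := (PySem.List.min?_eq_none_iff _ _).1 hm
    subst this
    exact absurd hp.symm (by simp)
  | some m =>
    have hmem : m ∈ heap := PySem.List.min?_mem hm
    have hmin : ∀ y ∈ heap, m ≤ y := fun y hy => PySem.List.min?_isMin hm y hy
    have ham : a ∈ heap := hp.mem_iff.2 (by simp)
    have hma : m ≤ a := hmin a ham
    have ha_le : ∀ y ∈ a :: t, a ≤ y := by
      intro y hy
      rcases List.mem_cons.1 hy with rfl | hyt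
      · omega
      · exact (List.pairwise_cons.1 hs).1 y hyt
    have ham2 : a ≤ m := ha_le m (hp.mem_iff.1 hmem)
    have : m = a := le_antisymm hma ham2
    rw [this]

theorem heapPop_of_perm_sorted {heap : List Int} {a : Int} {t : List Int}
    (hp : heap.Perm (a :: t)) (hs : (a :: t).Pairwise (· ≤ ·)) :
    ∃ r, heapPop heap = some (a, r) ∧ r.Perm t := by
  have hm := min?_of_perm_sorted hp hs
  refine ⟨heap.erase a, by simp [heapPop, hm], ?_⟩
  simpa using hp.erase a

theorem loop_eq (k : Int) : ∀ (n : ℕ) (heap s : List Int) (ops : Int),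
    s.length = n → heap.Perm s → s.Pairwise (· ≤ ·) → s ≠ [] →
    cookiesLoop k heap ops = cookiesAltLoop k s ops := by
  intro n
  induction n with
  | zero =>
    intro heap s ops hl hp hs hne
    exact absurd (List.length_eq_zero_iff.1 hl) hne
  | succ n ih =>
    intro heap s ops hl hp hs hne
    match s with
    | [a] =>
      have heq : heap = [a] := List.perm_singleton.1 hp
      subst heq
      rw [cookiesLoop]
      have hm : PySem.List.min? [a] (fun y => y) = some a :=
        min?_of_perm_sorted (List.Perm.refl _) hs
      simp [hm, cookiesAltLoop]
    | a :: b :: rest =>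
      have hlen : heap.length = rest.length + 2 := by
        have := hp.length_eq; simpa using this
      have hm : PySem.List.min? heap (fun y => y) = some a := min?_of_perm_sorted hp hs
      by_cases hak : a < k
      · obtain ⟨r1, hpop1, hr1⟩ := heapPop_of_perm_sorted hp hs
        have hs1 : (b :: rest).Pairwise (· ≤ ·) := (List.pairwise_cons.1 hs).2
        obtain ⟨r2, hpop2, hr2⟩ := heapPop_of_perm_sorted hr1 hs1
        rw [cookiesLoop]
        rw [if_pos ⟨by omega, by simp [hm, hak]⟩]
        split
        case h_2 heq => rw [hpop1] at heq; cases heq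
        case h_1 ls h1' heq =>
        rw [hpop1] at heq
        simp only [Option.some.injEq, Prod.mk.injEq] at heq
        obtain ⟨rfl, rfl⟩ := heq
        split
        case h_2 heq2 => rw [hpop2] at heq2; cases heq2
        case h_1 ss h2' heq2 =>
        rw [hpop2] at heq2
        simp only [Option.some.injEq, Prod.mk.injEq] at heq2
        obtain ⟨rfl, rfl⟩ := heq2
        rw [cookiesAltLoop, if_pos hak]
        have hrest : (rest).Pairwise (· ≤ ·) := (List.pairwise_cons.1 hs1).2
        apply ih
        · have := insSorted_length (a + 2 * b) rest
          have hsl : (a :: b :: rest).length = n + 1 := hl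
          simp only [List.length_cons] at hsl
          omega
        · exact (hr2.cons _).trans (insSorted_perm (a + 2 * b) rest).symm
        · exact insSorted_sorted _ hrest
        · have := insSorted_length (a + 2 * b) rest
          intro hnil; rw [hnil] at this; simp at this
      · rw [cookiesLoop]
        rw [if_neg (fun hc => hak (by simpa [hm] using hc.2))]
        rw [hm, cookiesAltLoop]
        simp [hak]

-- ===== VERDICT (by name: the statement is the Claim_ definition above) =====
theorem cookies_spec : Claim_equal_cookies := by
  intro k A _hdom hpre
  unfold Spec_cookies cookies cookies_alt
  exact loop_eq k (PySem.List.sorted A (fun y => y)).length A _ 0 rfl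
    (PySem.List.sorted_perm A (fun y => y) false).symm
    (PySem.List.sorted_pairwise A (fun y => y))
    (by intro h; exact hpre ((PySem.List.sorted_eq_nil_iff _ _ _).1 h))
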